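-- pv_equiv track=rewrite | github.com/SanketBhoite21/Equip9-DSA-questions | Problem2.py | match_best_deals
-- ===== SOURCE A (Python) =====
-- import heapq
--
-- def match_best_deals(requests, sellers):
--
--     seller_map = {}
--     for equipment, price in sellers:
--         if equipment not in seller_map:
--             seller_map[equipment] = []
--         heapq.heappush(seller_map[equipment], price)
--
--
--     results = []
--     for equipment, max_price in requests:
--         if equipment in seller_map:
--             while seller_map[equipment] and seller_map[equipment][0] > max_price:
--                 heapq.heappop(seller_map[equipment])
--
--             if seller_map[equipment]:
--                 results.append(heapq.heappop(seller_map[equipment]))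
--             else:
--                 results.append(None)
--         else:
--             results.append(None)
--
--     return results
-- ===== SOURCE B (Python) =====
-- def match_best_deals(requests, sellers):
--     # Offline three-stage algorithm: group prices and budgets per equipment,
--     # precompute each equipment's whole answer sequence as the longest valid
--     # prefix of zip(sorted prices, budgets), then deal the answers out to the
--     # requests in order with a per-equipment counter.
--     prices = {}
--     for equipment, price in sellers:
--         prices.setdefault(equipment, []).append(price)
--     budgets = {}
--     for equipment, budget in requests:
--         budgets.setdefault(equipment, []).append(budget)
--     answers = {}
--     for equipment, bs in budgets.items():
--         arr = sorted(prices.get(equipment, []))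
--         out = []
--         for j, b in enumerate(bs):
--             if j < len(arr) and arr[j] <= b:
--                 out.append(arr[j])
--             else:
--                 break
--         answers[equipment] = out
--     counters = {}
--     results = []
--     for equipment, _ in requests:
--         j = counters.get(equipment, 0)
--         counters[equipment] = j + 1
--         out = answers[equipment]
--         results.append(out[j] if j < len(out) else None)
--     return results
-- ===== Notes on version B (the rewrite author's own statement) =====
-- stated objective: alternative
-- what changed: Replaces A's online per-request heap mutation (heappush/heappop with a while-pop draining loop consuming seller state request by request) by an offline three-stage algorithm: group prices and budgets per equipment, precompute each equipment's entire answer sequence as the longest valid prefix of zip(sorted prices, budgets), then deal those precomputed answers out to the requests with a per-equipment counter.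
import Mathlib
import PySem

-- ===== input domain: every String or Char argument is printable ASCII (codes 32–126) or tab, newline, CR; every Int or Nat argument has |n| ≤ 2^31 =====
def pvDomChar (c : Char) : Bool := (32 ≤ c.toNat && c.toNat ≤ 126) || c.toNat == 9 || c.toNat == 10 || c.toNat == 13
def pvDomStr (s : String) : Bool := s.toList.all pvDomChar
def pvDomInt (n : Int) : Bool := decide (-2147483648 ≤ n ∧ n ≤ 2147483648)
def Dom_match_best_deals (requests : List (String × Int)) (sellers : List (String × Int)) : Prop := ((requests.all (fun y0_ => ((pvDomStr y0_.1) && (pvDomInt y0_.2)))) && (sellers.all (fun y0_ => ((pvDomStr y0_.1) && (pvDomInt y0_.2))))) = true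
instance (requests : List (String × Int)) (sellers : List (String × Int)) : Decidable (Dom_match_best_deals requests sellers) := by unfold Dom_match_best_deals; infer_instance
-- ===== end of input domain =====

-- B replaces A's online per-request heap mutation by an offline three-stage algorithm:
-- group prices and budgets per equipment, precompute each equipment's whole answer
-- sequence as the longest valid prefix of zip(sorted prices, budgets), then deal the
-- answers out to the requests in order with a per-equipment counter (alternative
-- decomposition; no consuming per-request seller state).

-- ===== PORT A =====
-- Transliteration of CPython's heapq._siftdown: the while loop, carrying `newitem`
-- (the locals `parentpos`/`parent` are inlined as (pos-1)/2 and h.getD ((pos-1)/2) 0;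
-- `fuel` only bounds the iteration count so the recursion is structural: pos strictly
-- decreases, so fuel = pos+1 is never exhausted and the loop semantics is unchanged).
def siftdownLoop (fuel : Nat) (h : List Int) (startpos pos : Nat) (newitem : Int) : List Int :=
  match fuel with
  | 0 => h.set pos newitem
  | fuel + 1 =>
    if startpos < pos then
      if newitem < h.getD ((pos - 1) / 2) 0 then
        siftdownLoop fuel (h.set pos (h.getD ((pos - 1) / 2) 0)) startpos ((pos - 1) / 2) newitem
      else h.set pos newitem
    else h.set pos newitem

-- heapq._siftdown(heap, startpos, pos): newitem = heap[pos], then the loop above.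
def siftdownA (h : List Int) (startpos pos : Nat) : List Int :=
  siftdownLoop (pos + 1) h startpos pos (h.getD pos 0)

-- `childpos` after the right-child comparison in heapq._siftup's loop body
def childSel (h : List Int) (pos : Nat) : Nat :=
  if 2 * pos + 2 < h.length ∧ ¬ (h.getD (2 * pos + 1) 0 < h.getD (2 * pos + 2) 0) then
    2 * pos + 2
  else 2 * pos + 1

-- the while loop of CPython's heapq._siftup (move the hole down along the smaller child;
-- fuel = h.length bounds the iterations structurally, the hole index strictly increases)
def siftupLoop (fuel : Nat) (h : List Int) (pos : Nat) : List Int × Nat :=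
  match fuel with
  | 0 => (h, pos)
  | fuel + 1 =>
    if 2 * pos + 1 < h.length then
      siftupLoop fuel (h.set pos (h.getD (childSel h pos) 0)) (childSel h pos)
    else (h, pos)

-- heapq._siftup(heap, pos): newitem = heap[pos]; loop; heap[pos] = newitem; _siftdown(heap, startpos, pos)
def siftupA (h : List Int) (pos : Nat) : List Int :=
  siftdownA ((siftupLoop h.length h pos).1.set (siftupLoop h.length h pos).2 (h.getD pos 0))
    pos (siftupLoop h.length h pos).2

-- heapq.heappush: heap.append(item); _siftdown(heap, 0, len(heap)-1)
def heappushA (h : List Int) (item : Int) : List Int :=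
  siftdownA (h ++ [item]) 0 h.length

-- heapq.heappop: lastelt = heap.pop(); if heap: r = heap[0]; heap[0] = lastelt; _siftup(heap, 0); return r
-- (returns the popped value together with the new heap; A only calls it on nonempty heaps)
def heappopA (h : List Int) : Int × List Int :=
  if h.dropLast.isEmpty then (h.getLast?.getD 0, h.dropLast)
  else (h.dropLast.getD 0 0, siftupA (h.dropLast.set 0 (h.getLast?.getD 0)) 0)

-- A's inner while loop: `while seller_map[eq] and seller_map[eq][0] > max_price:
-- heappop(...)`; each pop shortens the heap by one, so fuel = h.length makes the
-- recursion structural without ever cutting the loop short.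
def drainLoop (fuel : Nat) (h : List Int) (mp : Int) : List Int :=
  match fuel with
  | 0 => h
  | fuel + 1 =>
    if h.isEmpty then h
    else if mp < h.getD 0 0 then drainLoop fuel (heappopA h).2 mp
    else h

def drainA (h : List Int) (mp : Int) : List Int :=
  drainLoop h.length h mp

-- first loop of A: `if eq not in seller_map: seller_map[eq] = []` then `heappush(seller_map[eq], price)`
def sellerStepA (m : PySem.Dict String (List Int)) (s : String × Int) : PySem.Dict String (List Int) :=
  let m1 := if m.contains s.1 then m else m.insert s.1 ([] : List Int)
  m1.modify s.1 [] (fun hp => heappushA hp s.2)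

-- second loop of A (the in-place drain is written back into the dict, as the Python mutation does)
def requestStepA (st : PySem.Dict String (List Int) × List (Option Int)) (r : String × Int) :
    PySem.Dict String (List Int) × List (Option Int) :=
  if st.1.contains r.1 then
    let h := drainA (st.1.getD r.1 []) r.2
    if h.isEmpty then (st.1.insert r.1 h, st.2 ++ [none])
    else (st.1.insert r.1 (heappopA h).2, st.2 ++ [some (heappopA h).1])
  else (st.1, st.2 ++ [none])

def match_best_deals (requests : List (String × Int)) (sellers : List (String × Int)) : List (Option Int) :=
  (requests.foldl requestStepA (sellers.foldl sellerStepA PySem.Dict.empty, [])).2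

-- ===== PORT B =====
-- d.setdefault(key, []).append(value): the step of B's two grouping loops (the loop
-- bodies of the `prices` and `budgets` passes are the same Python statement)
def grpStep (d : PySem.Dict String (List Int)) (s : String × Int) : PySem.Dict String (List Int) :=
  (d.setdefault s.1 []).modify s.1 [] (fun l => l ++ [s.2])

-- `for j, b in enumerate(bs): if j < len(arr) and arr[j] <= b: out.append(arr[j]) else: break`
def serveLoop (arr : List Int) (j : Nat) (bs : List Int) (out : List Int) : List Int :=
  match bs with
  | [] => out
  | b :: rest =>
    if j < arr.length ∧ arr.getD j 0 ≤ b then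
      serveLoop arr (j + 1) rest (out ++ [arr.getD j 0])
    else out

-- third loop of B: `answers[eq] = out` for each (eq, bs) in budgets.items(), with
-- arr = sorted(prices.get(eq, []))
def answersOf (prices budgets : PySem.Dict String (List Int)) : PySem.Dict String (List Int) :=
  budgets.items.foldl
    (fun a kv =>
      a.insert kv.1 (serveLoop (PySem.List.sorted (prices.getD kv.1 []) (fun x => x) false) 0 kv.2 []))
    PySem.Dict.empty

-- dealing loop: j = counters.get(eq, 0); counters[eq] = j + 1;
-- results.append(answers[eq][j] if j < len(answers[eq]) else None)
-- (`answers[eq]` is ported as getD with []: every request equipment is a key of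
-- `budgets` and hence of `answers`, so the KeyError branch is unreachable)
def dealStep (answers : PySem.Dict String (List Int)) (st : PySem.Dict String Int × List (Option Int))
    (r : String × Int) : PySem.Dict String Int × List (Option Int) :=
  let j := st.1.getD r.1 0
  let out := answers.getD r.1 []
  (st.1.insert r.1 (j + 1), st.2 ++ [if j < (out.length : Int) then PySem.List.pyGet? out j else none])

def match_best_deals_alt (requests : List (String × Int)) (sellers : List (String × Int)) : List (Option Int) :=
  let prices := sellers.foldl grpStep PySem.Dict.empty
  let budgets := requests.foldl grpStep PySem.Dict.empty
  let answers := answersOf prices budgets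
  (requests.foldl (dealStep answers) (PySem.Dict.empty, [])).2

-- ===== PRECONDITION & SPEC =====
def Spec_match_best_deals (requests : List (String × Int)) (sellers : List (String × Int)) (out : List (Option Int)) : Prop := out = match_best_deals_alt requests sellers
instance (requests : List (String × Int)) (sellers : List (String × Int)) (out : List (Option Int)) : Decidable (Spec_match_best_deals requests sellers out) := by unfold Spec_match_best_deals; infer_instance

-- ===== CLAIM (what is proved, stated in full; the proofs are below) =====
def Claim_equal_match_best_deals : Prop := ∀ (requests : List (String × Int)) (sellers : List (String × Int)), Dom_match_best_deals requests sellers → Spec_match_best_deals requests sellers (match_best_deals requests sellers)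

-- ===== LEMMAS AND PROOFS =====

-- The proof goes through an intermediate, proof-only algorithm `requestStepB`
-- (consume the head of a per-equipment sorted remainder list): A's heap fold equals
-- the mid fold, and the mid fold equals B's precompute-then-deal passes.

def IsHeap (h : List Int) : Prop :=
  ∀ k, 0 < k → k < h.length → h.getD ((k - 1) / 2) 0 ≤ h.getD k 0

theorem getD_set_self (h : List Int) (i : Nat) (v : Int) (hi : i < h.length) :
    (h.set i v).getD i 0 = v := by
  simp [List.getD_eq_getElem?_getD, List.getElem?_set_self hi]

theorem getD_set_ne (h : List Int) (i j : Nat) (v : Int) (hij : i ≠ j) :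
    (h.set i v).getD j 0 = h.getD j 0 := by
  simp [List.getD_eq_getElem?_getD, List.getElem?_set_ne hij]

theorem getD_eq_getElem (h : List Int) (i : Nat) (hi : i < h.length) :
    h.getD i 0 = h[i] := by
  simp [List.getD_eq_getElem?_getD, List.getElem?_eq_getElem hi]

theorem set_perm (h : List Int) (i : Nat) (v : Int) (hi : i < h.length) :
    (h.set i v).Perm (v :: h.eraseIdx i) := by
  induction h generalizing i with
  | nil => simp at hi
  | cons a t ih =>
    cases i with
    | zero => simp
    | succ m =>
      simp only [List.set_cons_succ, List.eraseIdx_cons_succ]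
      exact ((ih m (by simpa using hi)).cons a).trans (List.Perm.swap v a _)

theorem self_perm_getD (h : List Int) (i : Nat) (hi : i < h.length) :
    h.Perm (h.getD i 0 :: h.eraseIdx i) := by
  rw [getD_eq_getElem h i hi]
  have := set_perm h i h[i] hi
  rwa [List.set_getElem_self] at this

theorem set_set_perm (h : List Int) (i j : Nat) (v : Int) (hij : i ≠ j)
    (hi : i < h.length) (hj : j < h.length) :
    ((h.set i (h.getD j 0)).set j v).Perm (h.set i v) := by
  induction h generalizing i j with
  | nil => simp at hi
  | cons a t ih =>
    cases i with
    | zero =>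
      cases j with
      | zero => exact absurd rfl hij
      | succ m =>
        simp only [List.getD_cons_succ, List.set_cons_zero, List.set_cons_succ]
        refine ((set_perm t m v (by simpa using hj)).cons (t.getD m 0)).trans ?_
        refine (List.Perm.swap v (t.getD m 0) _).trans ?_
        exact ((self_perm_getD t m (by simpa using hj)).symm.cons v)
    | succ k =>
      cases j with
      | zero =>
        simp only [List.getD_cons_zero, List.set_cons_succ, List.set_cons_zero]
        refine ((set_perm t k a (by simpa using hi)).cons v).trans ?_
        refine (List.Perm.swap a v _).trans ?_
        exact ((set_perm t k v (by simpa using hi)).symm.cons a)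
      | succ m =>
        simp only [List.getD_cons_succ, List.set_cons_succ]
        exact (ih k m (by omega) (by simpa using hi) (by simpa using hj)).cons a

theorem set_getD_self (h : List Int) (i : Nat) (hi : i < h.length) :
    h.set i (h.getD i 0) = h := by
  rw [getD_eq_getElem h i hi, List.set_getElem_self]

theorem root_le (h : List Int) (hh : IsHeap h) : ∀ k, k < h.length → h.getD 0 0 ≤ h.getD k 0 := by
  intro k
  induction k using Nat.strong_induction_on with
  | _ k ih =>
    intro hk
    rcases Nat.eq_zero_or_pos k with rfl | hk0
    · exact le_refl _
    · exact le_trans (ih ((k - 1) / 2) (by omega) (by omega)) (hh k hk0 hk)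

theorem root_le_mem (h : List Int) (hh : IsHeap h) {x : Int} (hx : x ∈ h) :
    h.getD 0 0 ≤ x := by
  obtain ⟨i, hi, rfl⟩ := List.mem_iff_getElem.mp hx
  rw [← getD_eq_getElem h i hi]
  exact root_le h hh i hi

theorem siftdownLoop_length (fuel : Nat) : ∀ (h : List Int) (sp pos : Nat) (ni : Int),
    (siftdownLoop fuel h sp pos ni).length = h.length := by
  induction fuel with
  | zero => intro h sp pos ni; simp [siftdownLoop]
  | succ n ih =>
    intro h sp pos ni
    simp only [siftdownLoop]
    split_ifs <;> simp [ih, List.length_set]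

theorem siftupLoop_length (fuel : Nat) : ∀ (h : List Int) (pos : Nat),
    (siftupLoop fuel h pos).1.length = h.length := by
  induction fuel with
  | zero => intro h pos; rfl
  | succ n ih =>
    intro h pos
    simp only [siftupLoop]
    split_ifs <;> simp [ih, List.length_set]

theorem siftupA_length (h : List Int) (pos : Nat) : (siftupA h pos).length = h.length := by
  unfold siftupA siftdownA
  rw [siftdownLoop_length, List.length_set, siftupLoop_length]

theorem heappopA_length (h : List Int) : (heappopA h).2.length = h.length - 1 := by
  unfold heappopA
  split <;> simp [siftupA_length, List.length_set, List.length_dropLast]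

theorem siftdownLoop_perm (fuel : Nat) : ∀ (h : List Int) (sp pos : Nat) (ni : Int),
    pos < h.length → pos < fuel →
    (siftdownLoop fuel h sp pos ni).Perm (h.set pos ni) := by
  induction fuel with
  | zero => intro h sp pos ni _ hf; omega
  | succ n ih =>
    intro h sp pos ni hp hf
    simp only [siftdownLoop]
    split_ifs with hlt hni
    · have hpp : (pos - 1) / 2 < h.length := by omega
      exact (ih _ sp _ ni (by simpa using hpp) (by omega)).trans
        (set_set_perm h pos ((pos - 1) / 2) ni (by omega) hp hpp)
    · exact List.Perm.refl _
    · exact List.Perm.refl _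

theorem siftdownLoop_isHeap (fuel : Nat) : ∀ (h : List Int) (sp pos : Nat) (ni : Int),
    sp = 0 → pos < h.length → pos < fuel →
    (∀ k, 0 < k → k < h.length → k ≠ pos → (k - 1) / 2 ≠ pos →
      h.getD ((k - 1) / 2) 0 ≤ h.getD k 0) →
    (∀ k, 0 < k → k < h.length → (k - 1) / 2 = pos → ni ≤ h.getD k 0) →
    (0 < pos → ∀ k, 0 < k → k < h.length → (k - 1) / 2 = pos →
      h.getD ((pos - 1) / 2) 0 ≤ h.getD k 0) →
    IsHeap (siftdownLoop fuel h sp pos ni) := by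
  induction fuel with
  | zero => intro h sp pos ni _ _ hf _ _ _; omega
  | succ n ih =>
    intro h sp pos ni hsp hp hf h1 h2 h3
    simp only [siftdownLoop]
    split_ifs with hlt hni
    · have hpos0 : 0 < pos := by omega
      have hpp : (pos - 1) / 2 < h.length := by omega
      apply ih _ sp _ ni hsp (by simpa using hpp) (by omega)
      · intro k hk0 hklen hkne hkpne
        rw [List.length_set] at hklen
        by_cases hkp : k = pos
        · exfalso; apply hkpne; omega
        · rw [getD_set_ne h pos k _ (by omega)]
          by_cases hpar : (k - 1) / 2 = pos
          · rw [hpar, getD_set_self h pos _ hp]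
            exact h3 hpos0 k hk0 hklen hpar
          · rw [getD_set_ne h pos ((k - 1) / 2) _ (by omega)]
            exact h1 k hk0 hklen hkp hpar
      · intro k hk0 hklen hkpar
        rw [List.length_set] at hklen
        by_cases hkp : k = pos
        · rw [hkp, getD_set_self h pos _ hp]
          exact le_of_lt hni
        · rw [getD_set_ne h pos k _ (by omega)]
          have := h1 k hk0 hklen hkp (by omega)
          rw [hkpar] at this
          exact le_trans (le_of_lt hni) this
      · intro hpp0 k hk0 hklen hkpar
        rw [List.length_set] at hklen
        have hstep : h.getD ((((pos - 1) / 2) - 1) / 2) 0 ≤ h.getD ((pos - 1) / 2) 0 :=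
          h1 ((pos - 1) / 2) hpp0 hpp (by omega) (by omega)
        rw [getD_set_ne h pos ((((pos - 1) / 2) - 1) / 2) _ (by omega)]
        by_cases hkp : k = pos
        · rw [hkp, getD_set_self h pos _ hp]
          exact hstep
        · rw [getD_set_ne h pos k _ (by omega)]
          have := h1 k hk0 hklen hkp (by omega)
          rw [hkpar] at this
          exact le_trans hstep this
    · intro k hk0 hklen
      rw [List.length_set] at hklen
      by_cases hkp : k = pos
      · rw [hkp, getD_set_ne h pos ((pos - 1) / 2) _ (by omega), getD_set_self h pos _ hp]
        exact le_of_not_gt (by simpa using hni)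
      · rw [getD_set_ne h pos k _ (by omega)]
        by_cases hpar : (k - 1) / 2 = pos
        · rw [hpar, getD_set_self h pos _ hp]
          exact h2 k hk0 hklen hpar
        · rw [getD_set_ne h pos ((k - 1) / 2) _ (by omega)]
          exact h1 k hk0 hklen hkp hpar
    · have hpos0 : pos = 0 := by omega
      subst hpos0
      intro k hk0 hklen
      rw [List.length_set] at hklen
      by_cases hpar : (k - 1) / 2 = 0
      · rw [hpar, getD_set_self h 0 _ hp, getD_set_ne h 0 k _ (by omega)]
        exact h2 k hk0 hklen hpar
      · rw [getD_set_ne h 0 ((k - 1) / 2) _ (by omega), getD_set_ne h 0 k _ (by omega)]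
        exact h1 k hk0 hklen (by omega) hpar

theorem childSel_facts (h : List Int) (pos : Nat) (hc : 2 * pos + 1 < h.length) :
    2 * pos + 1 ≤ childSel h pos ∧ childSel h pos < h.length ∧ childSel h pos ≤ 2 * pos + 2 := by
  unfold childSel; split_ifs <;> omega

theorem childSel_min (h : List Int) (pos : Nat) (hc : 2 * pos + 1 < h.length) (s : Nat)
    (hs1 : (s - 1) / 2 = pos) (hs0 : 0 < s) (hslen : s < h.length) (hne : s ≠ childSel h pos) :
    h.getD (childSel h pos) 0 ≤ h.getD s 0 := by
  have hs : s = 2 * pos + 1 ∨ s = 2 * pos + 2 := by omega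
  unfold childSel at *
  split_ifs at * with hsel
  · have hseq : s = 2 * pos + 1 := by omega
    rw [hseq]
    exact le_of_not_gt (by simpa using hsel.2)
  · have hseq : s = 2 * pos + 2 := by omega
    rw [not_and_or, not_not] at hsel
    have hsel2 : 2 * pos + 2 < h.length → h.getD (2 * pos + 1) 0 < h.getD (2 * pos + 2) 0 := by
      intro hlt
      rcases hsel with hx | hx
      · omega
      · exact hx
    rw [hseq]
    exact le_of_lt (hsel2 (by omega))

theorem siftupLoop_spec (fuel : Nat) : ∀ (h : List Int) (pos : Nat), pos < h.length →
    h.length ≤ fuel + pos →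
    (∀ k, 0 < k → k < h.length → k ≠ pos → (k - 1) / 2 ≠ pos →
      h.getD ((k - 1) / 2) 0 ≤ h.getD k 0) →
    (0 < pos → ∀ k, 0 < k → k < h.length → (k - 1) / 2 = pos →
      h.getD ((pos - 1) / 2) 0 ≤ h.getD k 0) →
    (siftupLoop fuel h pos).2 < h.length ∧
    h.length ≤ 2 * (siftupLoop fuel h pos).2 + 1 ∧
    (∀ k, 0 < k → k < h.length → k ≠ (siftupLoop fuel h pos).2 →
      (k - 1) / 2 ≠ (siftupLoop fuel h pos).2 →
      (siftupLoop fuel h pos).1.getD ((k - 1) / 2) 0 ≤ (siftupLoop fuel h pos).1.getD k 0) ∧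
    (∀ ni, ((siftupLoop fuel h pos).1.set (siftupLoop fuel h pos).2 ni).Perm (h.set pos ni)) := by
  induction fuel with
  | zero => intro h pos hp hlen h1 h2; omega
  | succ n ih =>
    intro h pos hp hlen h1 h2
    simp only [siftupLoop]
    split_ifs with hc
    · obtain ⟨hc1, hclen, hc2⟩ := childSel_facts h pos hc
      have hinner := ih (h.set pos (h.getD (childSel h pos) 0)) (childSel h pos)
        (by simpa using hclen) (by simp only [List.length_set]; omega) ?_ ?_
      · obtain ⟨i1, i2, i3, i4⟩ := hinner
        rw [List.length_set] at i1 i2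
        refine ⟨i1, i2, ?_, ?_⟩
        · intro k hk0 hklen hkne hkpne
          exact i3 k hk0 (by simpa using hklen) hkne hkpne
        · intro ni
          exact (i4 ni).trans (set_set_perm h pos (childSel h pos) ni (by omega) hp hclen)
      · intro k hk0 hklen hkne hkpne
        rw [List.length_set] at hklen
        by_cases hkp : k = pos
        · have hpos0 : 0 < pos := by omega
          rw [hkp, getD_set_ne h pos ((pos - 1) / 2) _ (by omega), getD_set_self h pos _ hp]
          exact h2 hpos0 (childSel h pos) (by omega) hclen (by omega)
        · rw [getD_set_ne h pos k _ (by omega)]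
          by_cases hpar : (k - 1) / 2 = pos
          · rw [hpar, getD_set_self h pos _ hp]
            exact childSel_min h pos hc k hpar hk0 hklen hkne
          · rw [getD_set_ne h pos ((k - 1) / 2) _ (by omega)]
            exact h1 k hk0 hklen hkp hpar
      · intro _ k hk0 hklen hkpar
        rw [List.length_set] at hklen
        have hcpar : (childSel h pos - 1) / 2 = pos := by omega
        rw [hcpar, getD_set_self h pos _ hp, getD_set_ne h pos k _ (by omega)]
        have := h1 k hk0 hklen (by omega) (by omega)
        rw [hkpar] at this
        exact this
    · exact ⟨hp, by omega, fun k hk0 hklen hkne hkpne => h1 k hk0 hklen hkne hkpne,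
        fun ni => List.Perm.refl _⟩

theorem siftupA_spec (h : List Int) (hp : 0 < h.length)
    (h1 : ∀ k, 0 < k → k < h.length → (k - 1) / 2 ≠ 0 →
      h.getD ((k - 1) / 2) 0 ≤ h.getD k 0) :
    IsHeap (siftupA h 0) ∧ (siftupA h 0).Perm h := by
  have hs := siftupLoop_spec h.length h 0 hp (by omega)
    (fun k hk0 hklen hkne hkpne => h1 k hk0 hklen hkpne) (by omega)
  obtain ⟨hlt, hbig, hinv, hperm⟩ := hs
  have hlen1 : (siftupLoop h.length h 0).1.length = h.length := siftupLoop_length h.length h 0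
  have hlt' : (siftupLoop h.length h 0).2 < (siftupLoop h.length h 0).1.length := by omega
  constructor
  · unfold siftupA siftdownA
    rw [getD_set_self _ _ _ hlt']
    apply siftdownLoop_isHeap _ _ 0 _ _ rfl (by simpa [List.length_set] using hlt') (by omega)
    · intro k hk0 hklen hkne hkpne
      rw [List.length_set, hlen1] at hklen
      rw [getD_set_ne _ _ ((k - 1) / 2) _ (by omega), getD_set_ne _ _ k _ (by omega)]
      exact hinv k hk0 (by omega) hkne hkpne
    · intro k hk0 hklen hkpar
      rw [List.length_set, hlen1] at hklen
      omega
    · intro hpos0 k hk0 hklen hkpar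
      rw [List.length_set, hlen1] at hklen
      omega
  · unfold siftupA siftdownA
    rw [getD_set_self _ _ _ hlt']
    refine (siftdownLoop_perm _ _ 0 _ _ (by simpa [List.length_set] using hlt') (by omega)).trans ?_
    rw [List.set_set]
    exact (hperm (h.getD 0 0)).trans (by rw [set_getD_self h 0 hp])

theorem getD_append_left (h : List Int) (x : Int) (i : Nat) (hi : i < h.length) :
    (h ++ [x]).getD i 0 = h.getD i 0 := by
  simp [List.getD_eq_getElem?_getD, List.getElem?_append_left hi]

theorem getD_append_length (h : List Int) (x : Int) : (h ++ [x]).getD h.length 0 = x := by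
  simp [List.getD_eq_getElem?_getD]

theorem heappushA_perm (h : List Int) (x : Int) : (heappushA h x).Perm (x :: h) := by
  unfold heappushA siftdownA
  rw [getD_append_length]
  have hlen : h.length < (h ++ [x]).length := by simp
  refine (siftdownLoop_perm _ _ 0 _ _ hlen (by omega)).trans ?_
  have hset : (h ++ [x]).set h.length x = h ++ [x] := by
    have := set_getD_self (h ++ [x]) h.length hlen
    rwa [getD_append_length] at this
  rw [hset]
  exact List.perm_append_comm

theorem heappushA_isHeap (h : List Int) (hh : IsHeap h) (x : Int) : IsHeap (heappushA h x) := by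
  unfold heappushA siftdownA
  rw [getD_append_length]
  apply siftdownLoop_isHeap _ _ 0 _ _ rfl (by simp) (by omega)
  · intro k hk0 hklen hkne hkpne
    simp only [List.length_append, List.length_cons, List.length_nil] at hklen
    have hklt : k < h.length := by omega
    rw [getD_append_left _ _ _ (by omega), getD_append_left _ _ _ hklt]
    exact hh k hk0 hklt
  · intro k hk0 hklen hkpar
    simp only [List.length_append, List.length_cons, List.length_nil] at hklen
    omega
  · intro hpos0 k hk0 hklen hkpar
    simp only [List.length_append, List.length_cons, List.length_nil] at hklen
    omega

theorem getD_dropLast (h : List Int) (k : Nat) (hk : k < h.length - 1) :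
    h.dropLast.getD k 0 = h.getD k 0 := by
  rw [List.getD_eq_getElem?_getD, List.getD_eq_getElem?_getD, List.getElem?_dropLast, if_pos hk]

theorem isHeap_nil : IsHeap [] := by
  intro k hk0 hklen
  simp at hklen

theorem heappopA_spec (h : List Int) (hne : h ≠ []) (hh : IsHeap h) :
    (heappopA h).1 = h.getD 0 0 ∧ ((heappopA h).1 :: (heappopA h).2).Perm h ∧
    IsHeap (heappopA h).2 := by
  have hlast : h.getLast?.getD 0 = h.getLast hne := by
    rw [List.getLast?_eq_some_getLast hne]
    rfl
  by_cases hrest : h.dropLast.isEmpty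
  · have hrest' : h.dropLast = [] := by simpa [List.isEmpty_iff] using hrest
    have hh1 : h = [h.getLast?.getD 0] := by
      rw [hlast]
      conv_lhs => rw [← List.dropLast_concat_getLast hne, hrest']
      rfl
    unfold heappopA
    rw [if_pos hrest, hrest']
    refine ⟨?_, ?_, isHeap_nil⟩
    · exact (congrArg (fun l => l.getD 0 0) hh1).symm
    · show ((h.getLast?.getD 0) :: ([] : List Int)).Perm h
      conv_rhs => rw [hh1]
  · have hrest' : h.dropLast ≠ [] := by simpa [List.isEmpty_iff] using hrest
    have hrl : 0 < h.dropLast.length := List.length_pos_of_ne_nil hrest'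
    have hlen2 : h.dropLast.length = h.length - 1 := List.length_dropLast
    have hIH : IsHeap h.dropLast := by
      intro k hk0 hklen
      rw [getD_dropLast _ _ (by omega), getD_dropLast _ _ (by omega)]
      exact hh k hk0 (by omega)
    have hsp := siftupA_spec (h.dropLast.set 0 (h.getLast?.getD 0))
      (by simpa [List.length_set] using hrl) ?_
    · unfold heappopA
      rw [if_neg hrest]
      refine ⟨getD_dropLast h 0 (by omega), ?_, hsp.1⟩
      have hp1 : (siftupA (h.dropLast.set 0 (h.getLast?.getD 0)) 0).Perm
          ((h.getLast?.getD 0) :: h.dropLast.eraseIdx 0) :=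
        hsp.2.trans (set_perm _ 0 _ hrl)
      obtain ⟨r0, rt, hr⟩ := List.exists_cons_of_ne_nil hrest'
      have hfull : h = (r0 :: rt) ++ [h.getLast?.getD 0] := by
        rw [hlast]
        conv_lhs => rw [← List.dropLast_concat_getLast hne, hr]
      rw [hr] at hp1 ⊢
      simp only [List.eraseIdx_cons_zero] at hp1
      simp only [List.getD_cons_zero]
      refine (hp1.cons r0).trans ?_
      have hperm2 : ((r0 :: rt) ++ [h.getLast?.getD 0]).Perm h := by
        rw [← hfull]
      exact ((List.perm_append_comm (l₁ := [h.getLast?.getD 0]) (l₂ := rt)).cons r0).trans hperm2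
    · intro k hk0 hklen hkpne
      rw [List.length_set] at hklen
      rw [getD_set_ne _ 0 ((k - 1) / 2) _ (by omega), getD_set_ne _ 0 k _ (by omega)]
      exact hIH k hk0 hklen

theorem drainLoop_of_le (fuel : Nat) (h : List Int) (mp : Int) (hle : h.getD 0 0 ≤ mp) :
    drainLoop fuel h mp = h := by
  cases fuel with
  | zero => rfl
  | succ n =>
    simp only [drainLoop]
    split_ifs with he hr
    · rfl
    · exact absurd hr (not_lt.mpr hle)
    · rfl

theorem drainA_of_le (h : List Int) (mp : Int) (hle : h.getD 0 0 ≤ mp) :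
    drainA h mp = h :=
  drainLoop_of_le h.length h mp hle

theorem drainLoop_all_gt (mp : Int) : ∀ (fuel : Nat) (h : List Int), h.length ≤ fuel →
    IsHeap h → (∀ x ∈ h, mp < x) → drainLoop fuel h mp = [] := by
  intro fuel
  induction fuel with
  | zero =>
    intro h hlen _ _
    cases h with
    | nil => rfl
    | cons a t => simp at hlen
  | succ n ih =>
    intro h hlen hh hgt
    by_cases hne : h = []
    · subst hne
      rfl
    · have hl0 : 0 < h.length := List.length_pos_of_ne_nil hne
      have hroot : mp < h.getD 0 0 := by
        rw [getD_eq_getElem h 0 hl0]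
        exact hgt _ (List.getElem_mem hl0)
      simp only [drainLoop]
      rw [if_neg (by simp [List.isEmpty_iff, hne]), if_pos hroot]
      have hps := heappopA_spec h hne hh
      apply ih
      · rw [heappopA_length]; omega
      · exact hps.2.2
      · intro x hx
        exact hgt x (hps.2.1.mem_iff.mp (List.mem_cons_of_mem _ hx))

theorem drainA_all_gt (h : List Int) (mp : Int) (hh : IsHeap h) (hgt : ∀ x ∈ h, mp < x) :
    drainA h mp = [] :=
  drainLoop_all_gt mp h.length h le_rfl hh hgt

-- ---- dict bookkeeping ----

theorem sellerStepA_getD (m : PySem.Dict String (List Int)) (s : String × Int) (k : String) :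
    (sellerStepA m s).getD k [] =
      if k = s.1 then heappushA (m.getD s.1 []) s.2 else m.getD k [] := by
  unfold sellerStepA
  by_cases hc : m.contains s.1
  · rw [if_pos hc, PySem.Dict.getD_modify]
  · have hc' : m.contains s.1 = false := by simpa using hc
    rw [if_neg hc, PySem.Dict.getD_modify]
    by_cases hk : k = s.1
    · simp [hk, PySem.Dict.getD_of_not_contains m [] hc']
    · simp [hk, PySem.Dict.getD_insert]

theorem sellerStepA_contains (m : PySem.Dict String (List Int)) (s : String × Int) (k : String) :
    (sellerStepA m s).contains k = (k == s.1 || m.contains k) := by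
  unfold sellerStepA
  by_cases hc : m.contains s.1
  · rw [if_pos hc, PySem.Dict.contains_modify]
  · rw [if_neg hc, PySem.Dict.contains_modify, PySem.Dict.contains_insert]
    by_cases hk : k == s.1 <;> simp_all

theorem grpStep_getD (g : PySem.Dict String (List Int)) (s : String × Int) (k : String) :
    (grpStep g s).getD k [] =
      if k = s.1 then g.getD s.1 [] ++ [s.2] else g.getD k [] := by
  unfold grpStep
  by_cases hc : g.contains s.1
  · rw [PySem.Dict.setdefault_of_contains g [] hc, PySem.Dict.getD_modify]
  · have hc' : g.contains s.1 = false := by simpa using hc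
    rw [PySem.Dict.setdefault_of_not_contains g [] hc', PySem.Dict.getD_modify]
    by_cases hk : k = s.1
    · simp [hk, PySem.Dict.getD_of_not_contains g [] hc']
    · simp [hk, PySem.Dict.getD_insert]

theorem grpStep_contains (g : PySem.Dict String (List Int)) (s : String × Int) (k : String) :
    (grpStep g s).contains k = (k == s.1 || g.contains k) := by
  unfold grpStep
  by_cases hc : g.contains s.1
  · rw [PySem.Dict.setdefault_of_contains g [] hc, PySem.Dict.contains_modify]
  · have hc' : g.contains s.1 = false := by simpa using hc
    rw [PySem.Dict.setdefault_of_not_contains g [] hc', PySem.Dict.contains_modify,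
      PySem.Dict.contains_insert]
    by_cases hk : k == s.1 <;> simp_all

theorem grpStep_nodup (g : PySem.Dict String (List Int)) (s : String × Int)
    (hg : g.keys.Nodup) : (grpStep g s).keys.Nodup := by
  unfold grpStep
  rw [PySem.Dict.keys_modify]
  by_cases hc : g.contains s.1
  · rw [PySem.Dict.setdefault_of_contains g [] hc]
    exact PySem.Dict.nodup_keys_insert _ _ _ hg
  · have hc' : g.contains s.1 = false := by simpa using hc
    rw [PySem.Dict.setdefault_of_not_contains g [] hc']
    exact PySem.Dict.nodup_keys_insert _ _ _ (PySem.Dict.nodup_keys_insert _ _ _ hg)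

-- mid algorithm (proof-only): consume the head of a per-equipment sorted remainder list
def requestStepB (st : PySem.Dict String (List Int) × List (Option Int)) (r : String × Int) :
    PySem.Dict String (List Int) × List (Option Int) :=
  match st.1.get? r.1 with
  | none => (st.1, st.2 ++ [none])
  | some arr =>
    match arr with
    | a :: t =>
      if a ≤ r.2 then (st.1.insert r.1 t, st.2 ++ [some a])
      else (st.1.insert r.1 ([] : List Int), st.2 ++ [none])
    | [] => (st.1.insert r.1 ([] : List Int), st.2 ++ [none])

-- relation between A's heap dict and the mid sorted-remainder dict, maintained through the request loop
def RelMG (m g : PySem.Dict String (List Int)) : Prop :=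
  ∀ k, m.contains k = g.contains k ∧ IsHeap (m.getD k []) ∧
    (m.getD k []).Perm (g.getD k []) ∧ (g.getD k []).Pairwise (· ≤ ·)

theorem request_step (m g : PySem.Dict String (List Int)) (r : String × Int)
    (res : List (Option Int)) (hrel : RelMG m g) :
    (requestStepA (m, res) r).2 = (requestStepB (g, res) r).2 ∧
    RelMG (requestStepA (m, res) r).1 (requestStepB (g, res) r).1 := by
  obtain ⟨hcont, hheap, hperm, hpair⟩ := hrel r.1
  by_cases hc : m.contains r.1
  · have hgc : g.contains r.1 = true := by rw [← hcont]; exact hc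
    have hget : g.get? r.1 ≠ none := by
      rw [Ne, PySem.Dict.get?_eq_none_iff_contains]
      simp [hgc]
    obtain ⟨arr, harr⟩ := Option.ne_none_iff_exists'.mp hget
    have harrv : g.getD r.1 [] = arr := PySem.Dict.getD_of_get?_eq_some g [] harr
    unfold requestStepA requestStepB
    simp only [harr, if_pos hc]
    cases arr with
    | nil =>
      have hm0 : m.getD r.1 [] = [] := by
        have hp2 := hperm
        rw [harrv] at hp2
        exact hp2.eq_nil
      rw [hm0]
      have hdr : drainA [] r.2 = [] := rfl
      rw [hdr]
      simp only [List.isEmpty_nil, if_true]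
      refine ⟨by trivial, ?_⟩
      intro k
      rw [PySem.Dict.contains_insert, PySem.Dict.contains_insert,
        PySem.Dict.getD_insert, PySem.Dict.getD_insert, (hrel k).1]
      by_cases hk : k = r.1 <;>
        simp [hk, isHeap_nil, (hrel k).2.1, (hrel k).2.2.1, (hrel k).2.2.2]
    | cons a t =>
      have hpa : (m.getD r.1 []).Perm (a :: t) := by rw [← harrv]; exact hperm
      have hpair' : (a :: t).Pairwise (· ≤ ·) := by rw [← harrv]; exact hpair
      have hmne : m.getD r.1 [] ≠ [] := by
        intro h0
        have := hpa.length_eq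
        rw [h0] at this
        simp at this
      have hl0 : 0 < (m.getD r.1 []).length := List.length_pos_of_ne_nil hmne
      have hamem : a ∈ m.getD r.1 [] := by
        rw [hpa.mem_iff]
        exact List.mem_cons_self
      by_cases hle : a ≤ r.2
      · have hroot : (m.getD r.1 []).getD 0 0 ≤ r.2 :=
          le_trans (root_le_mem _ hheap hamem) hle
        have hdr : drainA (m.getD r.1 []) r.2 = m.getD r.1 [] := drainA_of_le _ _ hroot
        have hps := heappopA_spec (m.getD r.1 []) hmne hheap
        have hv : (heappopA (m.getD r.1 [])).1 = a := by
          have hrmem : (m.getD r.1 []).getD 0 0 ∈ a :: t := by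
            rw [← hpa.mem_iff, getD_eq_getElem _ 0 hl0]
            exact List.getElem_mem hl0
          rcases List.mem_cons.mp hrmem with he | hm
          · rw [hps.1, he]
          · rw [hps.1]
            exact le_antisymm (root_le_mem _ hheap hamem)
              ((List.pairwise_cons.mp hpair').1 _ hm)
        have hpt : ((heappopA (m.getD r.1 [])).2).Perm t := by
          have h2 : ((heappopA (m.getD r.1 [])).1 :: (heappopA (m.getD r.1 [])).2).Perm (a :: t) :=
            hps.2.1.trans hpa
          rw [hv] at h2
          exact h2.cons_inv
        rw [hdr]
        dsimp only
        rw [if_neg (by simp [List.isEmpty_iff, hmne]), if_pos hle]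
        refine ⟨by rw [hv], ?_⟩
        intro k
        rw [PySem.Dict.contains_insert, PySem.Dict.contains_insert,
          PySem.Dict.getD_insert, PySem.Dict.getD_insert, (hrel k).1]
        by_cases hk : k = r.1
        · simp only [hk, if_true]
          exact ⟨by trivial, hps.2.2, hpt, hpair'.of_cons⟩
        · simp only [hk, if_false]
          exact ⟨by trivial, (hrel k).2.1, (hrel k).2.2.1, (hrel k).2.2.2⟩
      · have hall : ∀ x ∈ m.getD r.1 [], r.2 < x := by
          intro x hx
          have hx2 : x ∈ a :: t := hpa.mem_iff.mp hx
          rcases List.mem_cons.mp hx2 with rfl | hm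
          · omega
          · exact lt_of_lt_of_le (by omega) ((List.pairwise_cons.mp hpair').1 _ hm)
        have hdr : drainA (m.getD r.1 []) r.2 = [] := drainA_all_gt _ _ hheap hall
        rw [hdr]
        dsimp only
        simp only [List.isEmpty_nil, if_true]
        rw [if_neg hle]
        refine ⟨by trivial, ?_⟩
        intro k
        rw [PySem.Dict.contains_insert, PySem.Dict.contains_insert,
          PySem.Dict.getD_insert, PySem.Dict.getD_insert, (hrel k).1]
        by_cases hk : k = r.1 <;>
          simp [hk, isHeap_nil, (hrel k).2.1, (hrel k).2.2.1, (hrel k).2.2.2]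
  · have hgc : g.contains r.1 = false := by rw [← hcont]; simpa using hc
    have hget : g.get? r.1 = none := (PySem.Dict.get?_eq_none_iff_contains g r.1).mpr hgc
    unfold requestStepA requestStepB
    simp only [hget, if_neg hc]
    exact ⟨by trivial, hrel⟩

theorem request_fold (reqs : List (String × Int)) :
    ∀ (m g : PySem.Dict String (List Int)) (res : List (Option Int)), RelMG m g →
      (reqs.foldl requestStepA (m, res)).2 = (reqs.foldl requestStepB (g, res)).2 := by
  induction reqs with
  | nil => intro m g res _; rfl
  | cons r rs ih =>
    intro m g res hrel
    obtain ⟨hout, hrel2⟩ := request_step m g r res hrel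
    simp only [List.foldl_cons]
    have hA : requestStepA (m, res) r = ((requestStepA (m, res) r).1, (requestStepA (m, res) r).2) := rfl
    have hB : requestStepB (g, res) r = ((requestStepB (g, res) r).1, (requestStepB (g, res) r).2) := rfl
    rw [hA, hB, hout]
    exact ih _ _ _ hrel2

theorem build_rel (sellers : List (String × Int)) :
    ∀ (m g : PySem.Dict String (List Int)),
      (∀ k, m.contains k = g.contains k ∧ IsHeap (m.getD k []) ∧
        (m.getD k []).Perm (g.getD k [])) →
      (∀ k, (sellers.foldl sellerStepA m).contains k = (sellers.foldl grpStep g).contains k ∧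
        IsHeap ((sellers.foldl sellerStepA m).getD k []) ∧
        ((sellers.foldl sellerStepA m).getD k []).Perm ((sellers.foldl grpStep g).getD k [])) := by
  induction sellers with
  | nil => intro m g hmg; exact hmg
  | cons s ss ih =>
    intro m g hmg
    simp only [List.foldl_cons]
    apply ih
    intro k
    obtain ⟨hc, hh, hp⟩ := hmg k
    refine ⟨?_, ?_, ?_⟩
    · rw [sellerStepA_contains, grpStep_contains, hc]
    · rw [sellerStepA_getD]
      by_cases hk : k = s.1
      · simp only [hk, if_true]
        exact heappushA_isHeap _ (hmg s.1).2.1 _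
      · simp only [hk, if_false]
        exact hh
    · rw [sellerStepA_getD, grpStep_getD]
      by_cases hk : k = s.1
      · simp only [hk, if_true]
        refine (heappushA_perm _ _).trans ?_
        refine ((hmg s.1).2.2.cons s.2).trans ?_
        exact List.perm_append_comm (l₁ := [s.2]) (l₂ := g.getD s.1 [])
      · simp only [hk, if_false]
        exact hp

theorem build_nodup (sellers : List (String × Int)) :
    ∀ (g : PySem.Dict String (List Int)), g.keys.Nodup →
      (sellers.foldl grpStep g).keys.Nodup := by
  induction sellers with
  | nil => intro g hg; exact hg
  | cons s ss ih => intro g hg; exact ih _ (grpStep_nodup g s hg)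

-- `d.items` folded into a fresh dict with per-item values: pointwise characterisation
theorem mapPhase_get? (d : PySem.Dict String (List Int)) (hnd : d.keys.Nodup)
    (f : String × List Int → List Int) (k : String) :
    (d.items.foldl (fun a kv => a.insert kv.1 (f kv)) PySem.Dict.empty).get? k
      = (d.get? k).map (fun v => f (k, v)) := by
  have hfresh : ∀ p ∈ d.items,
      (PySem.Dict.empty : PySem.Dict String (List Int)).contains p.1 = false := by
    intro p _
    exact PySem.Dict.contains_empty _
  have hnd' : (d.items.map (fun p => p.1)).Nodup := by
    simpa [PySem.Dict.keys] using hnd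
  have hitems := PySem.Dict.items_foldl_insert_fresh d.items (fun kv => kv.1)
    (fun kv => f kv) PySem.Dict.empty hfresh hnd'
  set S := d.items.foldl (fun a kv => a.insert kv.1 (f kv)) PySem.Dict.empty with hS
  have hSitems : S.items = d.items.map (fun kv => (kv.1, f kv)) := by
    simpa using hitems
  have hSkeys : S.keys = d.keys := by
    simp only [PySem.Dict.keys, hSitems, List.map_map]
    rfl
  have hSnodup : S.keys.Nodup := by rw [hSkeys]; exact hnd
  cases hg : d.get? k with
  | none =>
    have hk : k ∉ d.keys := (PySem.Dict.get?_eq_none_iff_not_mem_keys d k).mp hg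
    have hk2 : k ∉ S.keys := by rw [hSkeys]; exact hk
    rw [(PySem.Dict.get?_eq_none_iff_not_mem_keys S k).mpr hk2]
    rfl
  | some v =>
    have hmem : (k, v) ∈ d.items := PySem.Dict.mem_items_of_get?_eq_some d hg
    have hmem2 : (k, f (k, v)) ∈ S.items := by
      rw [hSitems]
      exact List.mem_map.mpr ⟨(k, v), hmem, rfl⟩
    rw [PySem.Dict.get?_of_mem_items S hmem2 hSnodup]
    rfl

theorem initial_rel (sellers : List (String × Int)) :
    RelMG (sellers.foldl sellerStepA PySem.Dict.empty)
      ((sellers.foldl grpStep PySem.Dict.empty).items.foldl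
        (fun d kv => d.insert kv.1 (PySem.List.sorted kv.2 (fun x => x) false))
        PySem.Dict.empty) := by
  have hbr := build_rel sellers PySem.Dict.empty PySem.Dict.empty ?_
  · have hnd : (sellers.foldl grpStep PySem.Dict.empty).keys.Nodup :=
      build_nodup sellers PySem.Dict.empty PySem.Dict.nodup_keys_empty
    intro k
    obtain ⟨hc, hh, hp⟩ := hbr k
    set S := (sellers.foldl grpStep PySem.Dict.empty).items.foldl
      (fun d kv => d.insert kv.1 (PySem.List.sorted kv.2 (fun x => x) false))
      PySem.Dict.empty with hSdef
    have hs := mapPhase_get? (sellers.foldl grpStep PySem.Dict.empty) hnd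
      (fun kv => PySem.List.sorted kv.2 (fun x => x) false) k
    cases hg : (sellers.foldl grpStep PySem.Dict.empty).get? k with
    | none =>
      have hgc : (sellers.foldl grpStep PySem.Dict.empty).contains k = false := by
        rw [PySem.Dict.contains_eq_isSome_get?, hg]
        rfl
      have hmc : (sellers.foldl sellerStepA PySem.Dict.empty).contains k = false := by
        rw [hc]; exact hgc
      have hSg : S.get? k = none := by rw [hSdef, hs, hg]; rfl
      refine ⟨?_, hh, ?_, ?_⟩
      · rw [hc, hgc, PySem.Dict.contains_eq_isSome_get?, hSg]
        rfl
      · rw [PySem.Dict.getD_of_not_contains _ [] hmc,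
          PySem.Dict.getD_eq_get?_getD, hSg]
        exact List.Perm.refl _
      · rw [PySem.Dict.getD_eq_get?_getD, hSg]
        exact List.Pairwise.nil
    | some v =>
      have hSg : S.get? k = some (PySem.List.sorted v (fun x => x) false) := by
        rw [hSdef, hs, hg]
        rfl
      have hg0 : (sellers.foldl grpStep PySem.Dict.empty).getD k [] = v :=
        PySem.Dict.getD_of_get?_eq_some _ [] hg
      refine ⟨?_, hh, ?_, ?_⟩
      · rw [hc, PySem.Dict.contains_eq_isSome_get?, PySem.Dict.contains_eq_isSome_get?, hSg, hg]
        rfl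
      · rw [PySem.Dict.getD_eq_get?_getD S k [], hSg]
        refine (hp.trans ?_)
        rw [hg0]
        exact (PySem.List.sorted_perm v (fun x => x) false).symm
      · rw [PySem.Dict.getD_eq_get?_getD S k [], hSg]
        simpa using PySem.List.sorted_pairwise v (fun x => x)
  · intro k
    refine ⟨rfl, ?_, ?_⟩
    · rw [PySem.Dict.getD_empty]
      exact isHeap_nil
    · exact List.Perm.refl _

-- ---- mid = B ----

-- the budgets of the e-requests in rs, in order
def budsOf (e : String) (rs : List (String × Int)) : List Int :=
  (rs.filter (fun r => r.1 == e)).map Prod.snd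

theorem budsOf_cons_eq (e : String) (r : String × Int) (rs : List (String × Int))
    (h : r.1 = e) : budsOf e (r :: rs) = r.2 :: budsOf e rs := by
  simp [budsOf, h]

theorem budsOf_cons_ne (e : String) (r : String × Int) (rs : List (String × Int))
    (hne : r.1 ≠ e) : budsOf e (r :: rs) = budsOf e rs := by
  simp [budsOf, hne]

theorem foldGrp_getD (rs : List (String × Int)) :
    ∀ (d : PySem.Dict String (List Int)) (e : String),
      (rs.foldl grpStep d).getD e [] = d.getD e [] ++ budsOf e rs := by
  induction rs with
  | nil => intro d e; simp [budsOf]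
  | cons s ss ih =>
    intro d e
    simp only [List.foldl_cons]
    rw [ih, grpStep_getD]
    by_cases hk : e = s.1
    · rw [if_pos hk, budsOf_cons_eq e s ss hk.symm, hk, List.append_assoc]
      rfl
    · rw [if_neg hk, budsOf_cons_ne e s ss (fun h => hk h.symm)]

theorem serveLoop_acc (arr : List Int) :
    ∀ (bs out : List Int) (j : Nat), serveLoop arr j bs out = out ++ serveLoop arr j bs [] := by
  intro bs
  induction bs with
  | nil => intro out j; simp [serveLoop]
  | cons b rest ih =>
    intro out j
    simp only [serveLoop]
    split_ifs with hc
    · rw [ih (out ++ [arr.getD j 0]) (j + 1), ih ([] ++ [arr.getD j 0]) (j + 1)]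
      simp
    · simp

theorem serveLoop_nil_arr (bs : List Int) (j : Nat) (out : List Int) :
    serveLoop [] j bs out = out := by
  cases bs with
  | nil => rfl
  | cons b rest => simp [serveLoop]

-- single invariant-preserving traversal: mid's fold and B's dealing fold agree
theorem deal_fold (ans : PySem.Dict String (List Int)) (pr : String → List Int)
    (rs : List (String × Int)) :
    ∀ (g : PySem.Dict String (List Int)) (c : PySem.Dict String Int) (res : List (Option Int)),
      (∀ e, ∃ j : Nat, c.getD e 0 = (j : Int) ∧
        ((g.get? e = some ((pr e).drop j) ∧
            serveLoop (pr e) j (budsOf e rs) [] = (ans.getD e []).drop j)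
          ∨ ((g.get? e = none ∨ g.get? e = some []) ∧ (ans.getD e []).length ≤ j))) →
      (rs.foldl requestStepB (g, res)).2 = (rs.foldl (dealStep ans) (c, res)).2 := by
  induction rs with
  | nil => intro g c res _; rfl
  | cons r rs' ih =>
    intro g c res hinv
    obtain ⟨j, hj, hcase⟩ := hinv r.1
    simp only [List.foldl_cons]
    have hbuds : budsOf r.1 (r :: rs') = r.2 :: budsOf r.1 rs' :=
      budsOf_cons_eq r.1 r rs' rfl
    -- B's step value
    have hdeal : dealStep ans (c, res) r =
        (c.insert r.1 (c.getD r.1 0 + 1),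
         res ++ [if c.getD r.1 0 < ((ans.getD r.1 []).length : Int)
                 then PySem.List.pyGet? (ans.getD r.1 []) (c.getD r.1 0) else none]) := rfl
    rcases hcase with ⟨hg, hs⟩ | ⟨hg, hlen⟩
    · -- alive
      rw [hbuds] at hs
      simp only [serveLoop] at hs
      by_cases hcond : j < (pr r.1).length ∧ (pr r.1).getD j 0 ≤ r.2
      · -- success
        rw [if_pos hcond, serveLoop_acc] at hs
        have hdropj : (ans.getD r.1 []).drop j
            = (pr r.1).getD j 0 :: serveLoop (pr r.1) (j + 1) (budsOf r.1 rs') [] := by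
          rw [← hs]; rfl
        have hjlen : j < (ans.getD r.1 []).length := by
          by_contra hle
          have : (ans.getD r.1 []).drop j = [] := List.drop_eq_nil_of_le (by omega)
          rw [this] at hdropj
          exact absurd hdropj (by simp)
        have hgetj : (ans.getD r.1 [])[j] = (pr r.1).getD j 0 := by
          have h0 : ((ans.getD r.1 []).drop j)[0]'(by rw [hdropj]; simp) = (pr r.1).getD j 0 := by
            simp [hdropj]
          rw [List.getElem_drop] at h0
          simpa using h0
        have hdropmid : (pr r.1).drop j = (pr r.1).getD j 0 :: (pr r.1).drop (j + 1) := by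
          rw [getD_eq_getElem _ _ hcond.1, List.getElem_cons_drop]
        -- mid step
        have hmid : requestStepB (g, res) r =
            (g.insert r.1 ((pr r.1).drop (j + 1)), res ++ [some ((pr r.1).getD j 0)]) := by
          unfold requestStepB
          rw [hg, hdropmid]
          simp only [if_pos hcond.2]
        -- B's appended value
        have hbval : (if c.getD r.1 0 < ((ans.getD r.1 []).length : Int)
            then PySem.List.pyGet? (ans.getD r.1 []) (c.getD r.1 0) else none)
            = some ((pr r.1).getD j 0) := by
          rw [hj, if_pos (by exact_mod_cast hjlen)]
          rw [PySem.List.pyGet?_natCast, List.getElem?_eq_getElem hjlen, hgetj]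
        rw [hmid, hdeal, hbval]
        apply ih
        intro e
        by_cases he : e = r.1
        · subst he
          refine ⟨j + 1, ?_, Or.inl ⟨?_, ?_⟩⟩
          · rw [PySem.Dict.getD_insert, if_pos rfl, hj]; push_cast; ring
          · rw [PySem.Dict.get?_insert, if_pos rfl]
          · have : (ans.getD r.1 []).drop (j + 1) = ((ans.getD r.1 []).drop j).tail := by
              rw [List.tail_drop]
            rw [this, hdropj]
            rfl
        · obtain ⟨j', hj', hcase'⟩ := hinv e
          refine ⟨j', ?_, ?_⟩
          · rw [PySem.Dict.getD_insert, if_neg he]; exact hj'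
          · have hbe : budsOf e (r :: rs') = budsOf e rs' := by
              apply budsOf_cons_ne
              intro h; exact he (by rw [← h])
            rw [hbe] at hcase'
            rcases hcase' with ⟨hge, hse⟩ | ⟨hge, hle⟩
            · exact Or.inl ⟨by rw [PySem.Dict.get?_insert, if_neg he]; exact hge, hse⟩
            · refine Or.inr ⟨?_, hle⟩
              rw [PySem.Dict.get?_insert, if_neg he]
              exact hge
      · -- failure: the equipment's whole remainder is discarded
        rw [if_neg hcond] at hs
        have hlen : (ans.getD r.1 []).length ≤ j := by
          have : (ans.getD r.1 []).drop j = [] := hs.symm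
          have h2 := List.drop_eq_nil_iff.mp this
          omega
        have hbval : (if c.getD r.1 0 < ((ans.getD r.1 []).length : Int)
            then PySem.List.pyGet? (ans.getD r.1 []) (c.getD r.1 0) else none) = none := by
          rw [hj, if_neg (by exact_mod_cast not_lt.mpr hlen)]
        have hmid : requestStepB (g, res) r = (g.insert r.1 ([] : List Int), res ++ [none]) := by
          unfold requestStepB
          rw [hg]
          cases hdrop : (pr r.1).drop j with
          | nil => rfl
          | cons a t =>
            have hjl : j < (pr r.1).length := by
              have := congrArg List.length hdrop
              simp only [List.length_drop, List.length_cons] at this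
              omega
            have ha : a = (pr r.1).getD j 0 := by
              have h0 : ((pr r.1).drop j)[0]'(by rw [hdrop]; simp) = a := by simp [hdrop]
              rw [List.getElem_drop] at h0
              rw [getD_eq_getElem _ _ hjl, ← h0]
              simp
            have hna : ¬ a ≤ r.2 := by
              rw [ha]
              intro hle2
              exact hcond ⟨hjl, hle2⟩
            simp only [if_neg hna]
        rw [hmid, hdeal, hbval]
        apply ih
        intro e
        by_cases he : e = r.1
        · subst he
          refine ⟨j + 1, ?_, Or.inr ⟨Or.inr (by rw [PySem.Dict.get?_insert, if_pos rfl]), by omega⟩⟩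
          rw [PySem.Dict.getD_insert, if_pos rfl, hj]; push_cast; ring
        · obtain ⟨j', hj', hcase'⟩ := hinv e
          refine ⟨j', by rw [PySem.Dict.getD_insert, if_neg he]; exact hj', ?_⟩
          have hbe : budsOf e (r :: rs') = budsOf e rs' :=
            budsOf_cons_ne e r rs' (fun h => he (by rw [← h]))
          rw [hbe] at hcase'
          rcases hcase' with ⟨hge, hse⟩ | ⟨hge, hle⟩
          · exact Or.inl ⟨by rw [PySem.Dict.get?_insert, if_neg he]; exact hge, hse⟩
          · exact Or.inr ⟨by rw [PySem.Dict.get?_insert, if_neg he]; exact hge, hle⟩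
    · -- dead equipment: both sides answer none forever
      have hbval : (if c.getD r.1 0 < ((ans.getD r.1 []).length : Int)
          then PySem.List.pyGet? (ans.getD r.1 []) (c.getD r.1 0) else none) = none := by
        rw [hj, if_neg (by exact_mod_cast not_lt.mpr hlen)]
      rcases hg with hgn | hge
      · have hmid : requestStepB (g, res) r = (g, res ++ [none]) := by
          unfold requestStepB
          rw [hgn]
        rw [hmid, hdeal, hbval]
        apply ih
        intro e
        by_cases he : e = r.1
        · subst he
          exact ⟨j + 1, by rw [PySem.Dict.getD_insert, if_pos rfl, hj]; push_cast; ring,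
            Or.inr ⟨Or.inl hgn, by omega⟩⟩
        · obtain ⟨j', hj', hcase'⟩ := hinv e
          refine ⟨j', by rw [PySem.Dict.getD_insert, if_neg he]; exact hj', ?_⟩
          have hbe : budsOf e (r :: rs') = budsOf e rs' :=
            budsOf_cons_ne e r rs' (fun h => he (by rw [← h]))
          rw [hbe] at hcase'
          exact hcase'
      · have hmid : requestStepB (g, res) r = (g.insert r.1 ([] : List Int), res ++ [none]) := by
          unfold requestStepB
          rw [hge]
        rw [hmid, hdeal, hbval]
        apply ih
        intro e
        by_cases he : e = r.1
        · subst he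
          exact ⟨j + 1, by rw [PySem.Dict.getD_insert, if_pos rfl, hj]; push_cast; ring,
            Or.inr ⟨Or.inr (by rw [PySem.Dict.get?_insert, if_pos rfl]), by omega⟩⟩
        · obtain ⟨j', hj', hcase'⟩ := hinv e
          refine ⟨j', by rw [PySem.Dict.getD_insert, if_neg he]; exact hj', ?_⟩
          have hbe : budsOf e (r :: rs') = budsOf e rs' :=
            budsOf_cons_ne e r rs' (fun h => he (by rw [← h]))
          rw [hbe] at hcase'
          rcases hcase' with ⟨hge', hse⟩ | ⟨hge', hle'⟩
          · exact Or.inl ⟨by rw [PySem.Dict.get?_insert, if_neg he]; exact hge', hse⟩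
          · exact Or.inr ⟨by rw [PySem.Dict.get?_insert, if_neg he]; exact hge', hle'⟩

-- the initial states of the mid fold and of B's dealing fold satisfy the invariant
theorem initial_inv (requests sellers : List (String × Int)) :
    ∀ e, ∃ j : Nat, (PySem.Dict.empty : PySem.Dict String Int).getD e 0 = (j : Int) ∧
      ((((sellers.foldl grpStep PySem.Dict.empty).items.foldl
            (fun d kv => d.insert kv.1 (PySem.List.sorted kv.2 (fun x => x) false))
            PySem.Dict.empty).get? e
          = some ((PySem.List.sorted ((sellers.foldl grpStep PySem.Dict.empty).getD e [])
              (fun x => x) false).drop j) ∧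
          serveLoop (PySem.List.sorted ((sellers.foldl grpStep PySem.Dict.empty).getD e [])
              (fun x => x) false) j (budsOf e requests) []
            = ((answersOf (sellers.foldl grpStep PySem.Dict.empty)
                (requests.foldl grpStep PySem.Dict.empty)).getD e []).drop j)
        ∨ ((((sellers.foldl grpStep PySem.Dict.empty).items.foldl
              (fun d kv => d.insert kv.1 (PySem.List.sorted kv.2 (fun x => x) false))
              PySem.Dict.empty).get? e = none ∨
            ((sellers.foldl grpStep PySem.Dict.empty).items.foldl
              (fun d kv => d.insert kv.1 (PySem.List.sorted kv.2 (fun x => x) false))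
              PySem.Dict.empty).get? e = some []) ∧
           ((answersOf (sellers.foldl grpStep PySem.Dict.empty)
              (requests.foldl grpStep PySem.Dict.empty)).getD e []).length ≤ j)) := by
  intro e
  set P := sellers.foldl grpStep PySem.Dict.empty with hP
  set Q := requests.foldl grpStep PySem.Dict.empty with hQ
  have hndP : P.keys.Nodup := build_nodup sellers PySem.Dict.empty PySem.Dict.nodup_keys_empty
  have hndQ : Q.keys.Nodup := build_nodup requests PySem.Dict.empty PySem.Dict.nodup_keys_empty
  have hSmap := mapPhase_get? P hndP (fun kv => PySem.List.sorted kv.2 (fun x => x) false) e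
  have hAmap := mapPhase_get? Q hndQ
    (fun kv => serveLoop (PySem.List.sorted (P.getD kv.1 []) (fun x => x) false) 0 kv.2 []) e
  have hQbuds : Q.getD e [] = budsOf e requests := by
    rw [hQ, foldGrp_getD, PySem.Dict.getD_empty]
    rfl
  have hansD : (answersOf P Q).getD e []
      = serveLoop (PySem.List.sorted (P.getD e []) (fun x => x) false) 0 (budsOf e requests) [] := by
    unfold answersOf
    rw [PySem.Dict.getD_eq_get?_getD, hAmap]
    cases hq : Q.get? e with
    | none =>
      have : Q.getD e [] = [] := PySem.Dict.getD_of_get?_eq_none _ _ hq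
      rw [← hQbuds, this]
      cases hsl : PySem.List.sorted (P.getD e []) (fun x => x) false with
      | nil => rfl
      | cons a t => rfl
    | some bs =>
      have : Q.getD e [] = bs := PySem.Dict.getD_of_get?_eq_some _ _ hq
      rw [← hQbuds, this]
      rfl
  refine ⟨0, by simp [PySem.Dict.getD_empty], ?_⟩
  cases hp : P.get? e with
  | some v =>
    left
    have hPD : P.getD e [] = v := PySem.Dict.getD_of_get?_eq_some _ _ hp
    constructor
    · rw [hSmap, hp, hPD]
      rfl
    · rw [hansD]
      rfl
  | none =>
    right
    have hPD : P.getD e [] = [] := PySem.Dict.getD_of_get?_eq_none _ _ hp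
    constructor
    · left
      rw [hSmap, hp]
      rfl
    · rw [hansD, hPD]
      have : PySem.List.sorted ([] : List Int) (fun x => x) false = [] := rfl
      rw [this, serveLoop_nil_arr]
      simp

-- ===== VERDICT (by name: the statement is the Claim_ definition above) =====
theorem match_best_deals_spec : Claim_equal_match_best_deals := by
  intro requests sellers _dom
  unfold Spec_match_best_deals match_best_deals match_best_deals_alt
  rw [request_fold requests _ _ [] (initial_rel sellers)]
  exact deal_fold _
    (fun e => PySem.List.sorted ((sellers.foldl grpStep PySem.Dict.empty).getD e []) (fun x => x) false)
    requests _ _ [] (initial_inv requests sellers)
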